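-- pv_equiv track=rewrite | github.com/SamuelMaltais/CompetitiveProg | Kattis/8 mars/D.py | dfs
-- ===== SOURCE A (Python) =====
-- mdist = 50 * 20
--
-- def get_dist(store1, store2):
--     return abs(store1[0] - store2[0]) + abs(store1[1] - store2[1])
--
-- def dfs(start, finish, visited, stores):
--     if get_dist(start, finish) <= mdist:
--         return True
--
--     for i in range(len(visited)):
--         if not visited[i]:
--             if get_dist(start, stores[i]) <= mdist:
--                 visited[i] = True
--                 if dfs(stores[i], finish, visited, stores):
--                     return True
--
--     return False
-- ===== SOURCE B (Python) =====
-- mdist = 50 * 20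
--
-- def get_dist(store1, store2):
--     return abs(store1[0] - store2[0]) + abs(store1[1] - store2[1])
--
-- def dfs(start, finish, visited, stores):
--     # Iterative search: explicit stack plus batch neighbor discovery with an
--     # enumerate/zip comprehension, instead of A's recursion with an index loop.
--     # (Both mutate `visited`; the equivalence claimed is about the return value.)
--     stack = [start]
--     while stack:
--         cur = stack.pop()
--         if get_dist(cur, finish) <= mdist:
--             return True
--         hits = [(i, s) for i, (seen, s) in enumerate(zip(visited, stores))
--                 if not seen and get_dist(cur, s) <= mdist]
--         for i, _ in hits:
--             visited[i] = True
--         stack.extend(s for _, s in hits)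
--     return False
-- ===== Notes on version B (the rewrite author's own statement) =====
-- stated objective: alternative
-- what changed: Replaces the recursive depth-first search over an index loop by an iterative stack-based search whose neighbor step is a single enumerate/zip comprehension that collects all unvisited in-range stores at once, marks them, and extends the stack; the boolean reachability result is proved identical.
-- outside the precondition, e.g. on dfs((0, 0), (5000, 0), [False, False], [(900, 0)]): A raises IndexError, B returns False
import Mathlib
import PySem

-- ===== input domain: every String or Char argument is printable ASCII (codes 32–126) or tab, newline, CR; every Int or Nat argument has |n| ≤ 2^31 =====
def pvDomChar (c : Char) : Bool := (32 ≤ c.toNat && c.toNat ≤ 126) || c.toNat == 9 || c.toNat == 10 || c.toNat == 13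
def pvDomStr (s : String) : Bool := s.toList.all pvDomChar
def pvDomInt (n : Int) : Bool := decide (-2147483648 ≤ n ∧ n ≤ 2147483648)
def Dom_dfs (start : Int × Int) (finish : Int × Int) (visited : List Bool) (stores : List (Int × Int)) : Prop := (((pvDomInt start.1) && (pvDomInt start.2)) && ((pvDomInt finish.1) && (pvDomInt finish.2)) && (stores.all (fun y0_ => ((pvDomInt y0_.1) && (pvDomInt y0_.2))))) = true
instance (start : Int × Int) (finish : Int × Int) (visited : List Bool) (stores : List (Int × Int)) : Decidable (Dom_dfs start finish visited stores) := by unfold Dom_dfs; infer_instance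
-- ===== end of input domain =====

-- B replaces the recursive DFS by an iterative stack-based search whose neighbor step is
-- one enumerate/zip comprehension collecting all unvisited in-range stores at once; same
-- return value. Both Pythons mutate `visited` in place; the equivalence proved here is
-- about the RETURN value only (the final marking pattern of an early-success run differs).

-- ===== PORT A =====
-- shared module-level helpers (present in the Python module, used by both ports)
def mdist : Int := 50 * 20

def get_dist (store1 store2 : Int × Int) : Int :=
  |store1.1 - store2.1| + |store1.2 - store2.2|

-- the `for i in range(len(visited))` loop of A; `auxF` is the recursive call,
-- `k` counts the remaining iterations (i + k = len(visited) throughout);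
-- `none` = IndexError from `stores[i]` (excluded by Pre_dfs)
def dfsLoopA (stores : List (Int × Int))
    (auxF : Int × Int → List Bool → Option (Bool × List Bool)) (cur : Int × Int) :
    Nat → Nat → List Bool → Option (Bool × List Bool)
  | 0, _, v => some (false, v)
  | k + 1, i, v =>
    if v.getD i false then dfsLoopA stores auxF cur k (i + 1) v
    else
      match PySem.List.pyGet? stores (i : Int) with
      | none => none
      | some s =>
        if get_dist cur s ≤ mdist then
          match auxF s (v.set i true) with
          | none => none
          | some (true, v2) => some (true, v2)
          | some (false, v2) => dfsLoopA stores auxF cur k (i + 1) v2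
        else dfsLoopA stores auxF cur k (i + 1) v

-- A's recursive dfs, with the mutated `visited` threaded through and a fuel guard
-- for totality (fuel = len(visited)+1 always suffices: each recursion first marks a store)
def dfsAuxA (finish : Int × Int) (stores : List (Int × Int)) :
    Nat → Int × Int → List Bool → Option (Bool × List Bool)
  | 0, _, _ => none
  | fuel + 1, p, v =>
    if get_dist p finish ≤ mdist then some (true, v)
    else dfsLoopA stores (dfsAuxA finish stores fuel) p v.length 0 v

def dfs (start : Int × Int) (finish : Int × Int) (visited : List Bool) (stores : List (Int × Int)) : Bool :=
  match dfsAuxA finish stores (visited.length + 1) start visited with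
  | some (r, _) => r
  | none => false   -- only reachable outside Pre_dfs (IndexError); fuel never runs out

-- ===== PORT B =====
-- the `hits` comprehension of B: all (index, store) pairs of unvisited stores within
-- mdist of `cur`, read off `enumerate(zip(visited, stores))` in one pass
def hitsB (cur : Int × Int) (visited : List Bool) (stores : List (Int × Int)) :
    List (Int × (Int × Int)) :=
  (PySem.List.enumerate (visited.zip stores)).filterMap (fun p =>
    if p.2.1 = false ∧ get_dist cur p.2.2 ≤ mdist then some (p.1, p.2.2) else none)

-- B's `while stack:` loop: pop the last element, test the finish, then mark all hits
-- (`visited[i] = True`) and extend the stack with their stores; fuel guard for totality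
-- (fuel = len(visited)+2 always suffices: every pushed store was freshly marked)
def dfsLoopB (finish : Int × Int) (stores : List (Int × Int)) :
    Nat → List Bool → List (Int × Int) → Bool
  | 0, _, _ => false
  | fuel + 1, v, stack =>
    match stack.getLast? with
    | none => false
    | some cur =>
      if get_dist cur finish ≤ mdist then true
      else
        let hs := hitsB cur v stores
        dfsLoopB finish stores fuel
          (hs.foldl (fun w p => w.set p.1.toNat true) v)
          (stack.dropLast ++ hs.map (·.2))

def dfs_alt (start : Int × Int) (finish : Int × Int) (visited : List Bool) (stores : List (Int × Int)) : Bool :=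
  dfsLoopB finish stores (visited.length + 2) visited [start]

-- ===== PRECONDITION & SPEC =====
-- Pre_dfs excludes inputs where an unvisited index reaches beyond `stores` (and the start
-- is not already within mdist of the finish): there Python A either raises IndexError on
-- `stores[i]` or happens to return True before reaching the bad index, while B's
-- zip-comprehension silently ignores those indices.
def Pre_dfs (start : Int × Int) (finish : Int × Int) (visited : List Bool) (stores : List (Int × Int)) : Prop :=
  (∀ i, i < visited.length → visited.getD i false = false → i < stores.length)
  ∨ |start.1 - finish.1| + |start.2 - finish.2| ≤ 1000
instance (start : Int × Int) (finish : Int × Int) (visited : List Bool) (stores : List (Int × Int)) : Decidable (Pre_dfs start finish visited stores) := by unfold Pre_dfs; infer_instance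

def pvWitness_dfs : (Int × Int) × (Int × Int) × List Bool × (List (Int × Int)) :=
  ((0, 0), (0, 0), [false], [(0, 0)])

def Spec_dfs (start : Int × Int) (finish : Int × Int) (visited : List Bool) (stores : List (Int × Int)) (out : Bool) : Prop := out = dfs_alt start finish visited stores
instance (start : Int × Int) (finish : Int × Int) (visited : List Bool) (stores : List (Int × Int)) (out : Bool) : Decidable (Spec_dfs start finish visited stores out) := by unfold Spec_dfs; infer_instance

-- ===== CLAIM (what is proved, stated in full; the proofs are below) =====
def Claim_equal_dfs : Prop := ∀ (start : Int × Int) (finish : Int × Int) (visited : List Bool) (stores : List (Int × Int)), Dom_dfs start finish visited stores → Pre_dfs start finish visited stores → Spec_dfs start finish visited stores (dfs start finish visited stores)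

-- ===== LEMMAS AND PROOFS =====

-- every unvisited index is a valid index into `stores` (Pre_dfs's first disjunct)
def Good (stores : List (Int × Int)) (v : List Bool) : Prop :=
  ∀ i, i < v.length → v.getD i false = false → i < stores.length

-- reachability of the finish through currently-unvisited stores: the common
-- specification both searches are proved to decide
inductive Reach (finish : Int × Int) (stores : List (Int × Int)) : List Bool → Int × Int → Prop where
  | done {v : List Bool} {p : Int × Int} :
      get_dist p finish ≤ mdist → Reach finish stores v p
  | step {v : List Bool} {p : Int × Int} (i : Nat) :
      i < v.length → v.getD i false = false →
      get_dist p (stores.getD i (0, 0)) ≤ mdist →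
      Reach finish stores (v.set i true) (stores.getD i (0, 0)) →
      Reach finish stores v p

theorem getD_set_bool (v : List Bool) (i j : Nat) (b : Bool) :
    (v.set i b).getD j false = if j = i ∧ j < v.length then b else v.getD j false := by
  induction v generalizing i j with
  | nil => simp
  | cons a t ih =>
    cases i with
    | zero => cases j <;> simp [List.set]
    | succ i' =>
      cases j with
      | zero => simp [List.set]
      | succ j' => simpa [List.set, Nat.succ_lt_succ_iff] using ih i' j'

theorem countFalse_set (v : List Bool) (i : Nat) (h : i < v.length)
    (hf : v.getD i false = false) : (v.set i true).count false + 1 = v.count false := by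
  induction v generalizing i with
  | nil => simp at h
  | cons a t ih =>
    cases i with
    | zero => simp_all [List.set]
    | succ i' =>
      simp only [List.set, List.count_cons]
      have := ih i' (by simpa [Nat.succ_lt_succ_iff] using h) (by simpa using hf)
      omega

theorem reach_mono {finish : Int × Int} {stores : List (Int × Int)} {v' : List Bool}
    {p : Int × Int} (h : Reach finish stores v' p) :
    ∀ v : List Bool, v.length = v'.length →
      (∀ j, v.getD j false = true → v'.getD j false = true) → Reach finish stores v p := by
  induction h with
  | done hd => exact fun _ _ _ => Reach.done hd
  | @step w q i hi hf hc _ ih =>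
    intro v hlen hmono
    have hvf : v.getD i false = false := by
      cases hcase : v.getD i false with
      | false => rfl
      | true =>
        have hw := hmono i hcase
        rw [List.getD_eq_getElem?_getD] at hw
        simp [hw] at hf
    refine Reach.step i (by omega) hvf hc (ih (v.set i true) ?_ ?_)
    · simp [hlen]
    · intro j hj
      rw [getD_set_bool] at hj ⊢
      by_cases hji : j = i
      · simp [hji, hi]
      · simp [hji] at hj ⊢
        exact hmono j hj

theorem reach_splice {finish : Int × Int} {stores : List (Int × Int)} {v : List Bool}
    {p : Int × Int} (h : Reach finish stores v p) :
    ∀ i, i < v.length → v.getD i false = false →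
      Reach finish stores (v.set i true) p ∨
      Reach finish stores (v.set i true) (stores.getD i (0, 0)) := by
  induction h with
  | done hd => exact fun _ _ _ => Or.inl (Reach.done hd)
  | @step w q j hj hf hc hr ih =>
    intro i hi hvi
    by_cases hji : j = i
    · subst hji
      exact Or.inr hr
    · have hwi : (w.set j true).getD i false = false := by
        rw [getD_set_bool]
        simp only [List.getD_eq_getElem?_getD] at hvi ⊢
        simp [Ne.symm hji, hvi]
      rcases ih i (by simpa using hi) hwi with h1 | h2
      · left
        have hcomm : (w.set j true).set i true = (w.set i true).set j true := by
          rw [List.set_comm _ _ hji]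
        refine Reach.step j (by simpa using hj) ?_ hc ?_
        · rw [getD_set_bool]
          simp only [List.getD_eq_getElem?_getD] at hf ⊢
          simp [hji, hf]
        · rw [← hcomm]; exact h1
      · right
        refine reach_mono h2 (w.set i true) (by simp) ?_
        intro l hl
        by_cases hli : l = i
        · subst hli
          rw [getD_set_bool]
          simp [hi]
        · have hwl : w.getD l false = true := by
            rw [getD_set_bool] at hl
            simpa [hli] using hl
          rw [getD_set_bool]
          simp only [hli, false_and, if_false]
          rw [getD_set_bool]
          split_ifs with hc2
          · rfl
          · exact hwl

theorem not_reach {finish : Int × Int} {stores : List (Int × Int)} {v : List Bool}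
    {p : Int × Int} (h1 : ¬ get_dist p finish ≤ mdist)
    (h2 : ∀ j, j < v.length → v.getD j false = false →
      ¬ get_dist p (stores.getD j (0, 0)) ≤ mdist) : ¬ Reach finish stores v p := by
  intro h
  cases h with
  | done hd => exact h1 hd
  | step i hi hf hc _ => exact h2 i hi hf hc

theorem set_true_mono (v : List Bool) (i j : Nat) (h : v.getD j false = true) :
    (v.set i true).getD j false = true := by
  rw [getD_set_bool]
  split_ifs with hc
  · rfl
  · exact h

theorem set_true_getD_false (v : List Bool) (i j : Nat)
    (h : (v.set i true).getD j false = false) : v.getD j false = false := by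
  rw [getD_set_bool] at h
  split_ifs at h with hc
  exact h

-- postcondition of A's recursive search
def AuxPost (finish : Int × Int) (stores : List (Int × Int)) (p : Int × Int)
    (v v' : List Bool) (r : Bool) : Prop :=
  v'.length = v.length ∧
  (∀ j, v.getD j false = true → v'.getD j false = true) ∧
  v'.count false ≤ v.count false ∧
  (r = true → Reach finish stores v p) ∧
  (r = false → (∀ q, Reach finish stores v q → Reach finish stores v' q) ∧
    ¬ Reach finish stores v' p)

theorem loopA_main (finish : Int × Int) (stores : List (Int × Int)) (fuel : Nat)
    (IH : ∀ (p : Int × Int) (v : List Bool), Good stores v → v.count false < fuel →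
      ∃ r v', dfsAuxA finish stores fuel p v = some (r, v') ∧ AuxPost finish stores p v v' r) :
    ∀ k i (v : List Bool) (cur : Int × Int), Good stores v → v.count false ≤ fuel →
      i + k = v.length →
      ∃ r v', dfsLoopA stores (dfsAuxA finish stores fuel) cur k i v = some (r, v') ∧
        v'.length = v.length ∧
        (∀ j, v.getD j false = true → v'.getD j false = true) ∧
        v'.count false ≤ v.count false ∧
        (r = true → Reach finish stores v cur) ∧
        (r = false → (∀ q, Reach finish stores v q → Reach finish stores v' q) ∧
          (∀ j, i ≤ j → j < v.length → v'.getD j false = false →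
            ¬ get_dist cur (stores.getD j (0, 0)) ≤ mdist)) := by
  intro k
  induction k with
  | zero =>
    intro i v cur hg hcf hik
    refine ⟨false, v, rfl, rfl, fun j h => h, le_refl _, by simp, ?_⟩
    intro _
    exact ⟨fun q h => h, fun j hij hjlen _ => by omega⟩
  | succ k ih =>
    intro i v cur hg hcf hik
    have hi : i < v.length := by omega
    by_cases h1 : v.getD i false
    · obtain ⟨r, v', heq, hlen, hmono, hcnt, htrue, hfalse⟩ :=
        ih (i + 1) v cur hg hcf (by omega)
      refine ⟨r, v', by rw [dfsLoopA, if_pos h1]; exact heq, hlen, hmono, hcnt, htrue, ?_⟩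
      intro hr
      obtain ⟨hii, hiii⟩ := hfalse hr
      refine ⟨hii, ?_⟩
      intro j hij hjlen hvj
      rcases Nat.lt_or_ge i j with hji | hji
      · exact hiii j (by omega) hjlen hvj
      · have hj : j = i := by omega
        subst hj
        rw [hmono j h1] at hvj
        simp at hvj
    · have h1f : v.getD i false = false := by simpa using h1
      have histores : i < stores.length := hg i hi h1f
      have hgd : stores.getD i (0, 0) = stores[i] := List.getD_eq_getElem _ _ histores
      have hst : PySem.List.pyGet? stores (i : Int) = some (stores.getD i (0, 0)) := by
        simp [List.getElem?_eq_getElem histores]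
      have hstep : dfsLoopA stores (dfsAuxA finish stores fuel) cur (k + 1) i v =
          (if get_dist cur (stores.getD i (0, 0)) ≤ mdist then
            match dfsAuxA finish stores fuel (stores.getD i (0, 0)) (v.set i true) with
            | none => none
            | some (true, v2) => some (true, v2)
            | some (false, v2) => dfsLoopA stores (dfsAuxA finish stores fuel) cur k (i + 1) v2
          else dfsLoopA stores (dfsAuxA finish stores fuel) cur k (i + 1) v) := by
        rw [dfsLoopA, if_neg (by rw [h1f]; simp), hst]
      by_cases hc : get_dist cur (stores.getD i (0, 0)) ≤ mdist
      · have hcnt1 := countFalse_set v i hi h1f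
        have hg1 : Good stores (v.set i true) := by
          intro l hl hlf
          exact hg l (by simpa using hl) (set_true_getD_false v i l hlf)
        obtain ⟨ra, v2, haux, hplen, hpmono, hpcnt, hptrue, hpfalse⟩ :=
          IH (stores.getD i (0, 0)) (v.set i true) hg1 (by omega)
        have hlen1 : v2.length = v.length := by rw [hplen]; simp
        cases ra with
        | true =>
          refine ⟨true, v2, ?_, hlen1, ?_, ?_, ?_, by simp⟩
          · rw [hstep, if_pos hc, haux]
          · intro j hj
            exact hpmono j (set_true_mono v i j hj)
          · have := hpcnt
            have h2 : (v.set i true).count false + 1 = v.count false := hcnt1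
            omega
          · intro _
            exact Reach.step i hi h1f hc (hptrue rfl)
        | false =>
          obtain ⟨hT, hNR⟩ := hpfalse rfl
          have hg2 : Good stores v2 := by
            intro l hl hlf
            have hv1f : (v.set i true).getD l false = false := by
              cases hx : (v.set i true).getD l false with
              | false => rfl
              | true => rw [hpmono l hx] at hlf; simp at hlf
            exact hg1 l (by omega) hv1f
          obtain ⟨r, v', heq, hlen, hmono, hcnt, htrue, hfalse⟩ :=
            ih (i + 1) v2 cur hg2 (by omega) (by omega)
          refine ⟨r, v', ?_, by omega, ?_, by omega, ?_, ?_⟩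
          · rw [hstep, if_pos hc, haux]; exact heq
          · intro j hj
            exact hmono j (hpmono j (set_true_mono v i j hj))
          · intro hr
            refine reach_mono (htrue hr) v (by omega) ?_
            intro j hj
            exact hpmono j (set_true_mono v i j hj)
          · intro hr
            obtain ⟨hii, hiii⟩ := hfalse hr
            constructor
            · intro q hq
              rcases reach_splice hq i hi h1f with hl | hrr
              · exact hii q (hT q hl)
              · exact absurd (hT _ hrr) hNR
            · intro j hij hjlen hvj
              rcases Nat.lt_or_ge i j with hji | hji
              · exact hiii j (by omega) (by omega) hvj
              · have hj : j = i := by omega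
                have hv1i : (v.set i true).getD i false = true := by
                  rw [getD_set_bool]
                  simp [hi]
                rw [hj] at hvj
                rw [hmono i (hpmono i hv1i)] at hvj
                simp at hvj
      · obtain ⟨r, v', heq, hlen, hmono, hcnt, htrue, hfalse⟩ :=
          ih (i + 1) v cur hg hcf (by omega)
        refine ⟨r, v', by rw [hstep, if_neg hc]; exact heq, hlen, hmono, hcnt, htrue, ?_⟩
        intro hr
        obtain ⟨hii, hiii⟩ := hfalse hr
        refine ⟨hii, ?_⟩
        intro j hij hjlen hvj
        rcases Nat.lt_or_ge i j with hji | hji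
        · exact hiii j (by omega) hjlen hvj
        · have hj : j = i := by omega
          subst hj
          exact hc

theorem auxA_main (finish : Int × Int) (stores : List (Int × Int)) :
    ∀ fuel (p : Int × Int) (v : List Bool), Good stores v → v.count false < fuel →
      ∃ r v', dfsAuxA finish stores fuel p v = some (r, v') ∧ AuxPost finish stores p v v' r := by
  intro fuel
  induction fuel with
  | zero =>
    intro p v hg hcf
    omega
  | succ fuel IH =>
    intro p v hg hcf
    by_cases hd : get_dist p finish ≤ mdist
    · exact ⟨true, v, by rw [dfsAuxA, if_pos hd], rfl, fun j h => h, le_refl _,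
        fun _ => Reach.done hd, by simp⟩
    · obtain ⟨r, v', heq, hlen, hmono, hcnt, htrue, hfalse⟩ :=
        loopA_main finish stores fuel IH v.length 0 v p hg (by omega) (by omega)
      refine ⟨r, v', by rw [dfsAuxA, if_neg hd]; exact heq, hlen, hmono, hcnt, htrue, ?_⟩
      intro hr
      obtain ⟨hii, hiii⟩ := hfalse hr
      refine ⟨hii, not_reach hd ?_⟩
      intro j hjlen hvj
      exact hiii j (by omega) (by omega) hvj

-- ===== B-side lemmas =====

-- the fold that performs `for i, _ in hits: visited[i] = True`
def markAll (hs : List (Int × (Int × Int))) (v : List Bool) : List Bool :=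
  hs.foldl (fun w p => w.set p.1.toNat true) v

-- membership characterisation of the hits comprehension
theorem mem_hitsB {cur : Int × Int} {v : List Bool} {stores : List (Int × Int)}
    {p : Int × (Int × Int)} :
    p ∈ hitsB cur v stores ↔ ∃ k : Nat, k < v.length ∧ k < stores.length ∧
      p.1 = (k : Int) ∧ v.getD k false = false ∧ p.2 = stores.getD k (0, 0) ∧
      get_dist cur (stores.getD k (0, 0)) ≤ mdist := by
  unfold hitsB
  rw [List.mem_filterMap]
  constructor
  · rintro ⟨q, hq, hfq⟩
    rw [PySem.List.mem_enumerate_iff] at hq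
    obtain ⟨k, hk, rfl⟩ := hq
    have hklen : k < v.length ∧ k < stores.length := by
      simpa [List.length_zip] using hk
    split_ifs at hfq with hcond
    · obtain ⟨hseen, hdist⟩ := hcond
      obtain rfl : ((0 + (k : Int), (v.zip stores)[k]).1,
          (0 + (k : Int), (v.zip stores)[k]).2.2) = p := Option.some_inj.mp hfq
      have hzip : (v.zip stores)[k] = (v[k]'hklen.1, stores[k]'hklen.2) := List.getElem_zip
      refine ⟨k, hklen.1, hklen.2, by simp, ?_, ?_, ?_⟩
      · rw [List.getD_eq_getElem _ _ hklen.1]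
        simpa [hzip] using hseen
      · rw [List.getD_eq_getElem _ _ hklen.2]
        simp [hzip]
      · rw [List.getD_eq_getElem _ _ hklen.2]
        simpa [hzip] using hdist
  · rintro ⟨k, hkv, hks, hp1, hvk, hp2, hdist⟩
    have hkzip : k < (v.zip stores).length := by simp [List.length_zip]; omega
    refine ⟨(0 + (k : Int), (v.zip stores)[k]), ?_, ?_⟩
    · rw [PySem.List.mem_enumerate_iff]
      exact ⟨k, hkzip, rfl⟩
    · have hzip : (v.zip stores)[k] = (v[k]'hkv, stores[k]'hks) := List.getElem_zip
      have hv : v[k]'hkv = false := by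
        rw [List.getD_eq_getElem _ _ hkv] at hvk; exact hvk
      have hsk : stores[k]'hks = stores.getD k (0, 0) := (List.getD_eq_getElem _ _ hks).symm
      rw [hzip]
      rw [if_pos ⟨hv, by rw [hsk]; exact hdist⟩]
      obtain ⟨p1, p2⟩ := p
      simp only at hp1 hp2
      rw [Option.some_inj, Prod.ext_iff]
      exact ⟨by simp [hp1], by simp [hsk, hp2]⟩

-- the indices in the hits list are strictly increasing
theorem hitsB_pairwise (cur : Int × Int) (v : List Bool) (stores : List (Int × Int)) :
    (hitsB cur v stores).Pairwise (fun p q => p.1 < q.1) := by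
  unfold hitsB
  rw [List.pairwise_filterMap]
  refine (PySem.List.pairwise_lt_enumerate _ _).imp ?_
  intro a b hab x hx y hy
  split_ifs at hx hy
  · obtain rfl : (a.1, a.2.2) = x := by simpa using hx
    obtain rfl : (b.1, b.2.2) = y := by simpa using hy
    exact hab

theorem markAll_length (hs : List (Int × (Int × Int))) (v : List Bool) :
    (markAll hs v).length = v.length := by
  induction hs generalizing v with
  | nil => rfl
  | cons h t ih => simpa [markAll, List.foldl_cons] using ih (v.set h.1.toNat true)

theorem markAll_getD_true (hs : List (Int × (Int × Int))) (v : List Bool) (j : Nat) :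
    (markAll hs v).getD j false = true ↔
      v.getD j false = true ∨ (∃ p ∈ hs, p.1.toNat = j ∧ j < v.length) := by
  induction hs generalizing v with
  | nil => simp [markAll]
  | cons h t ih =>
    have : markAll (h :: t) v = markAll t (v.set h.1.toNat true) := rfl
    rw [this, ih]
    rw [getD_set_bool]
    constructor
    · rintro (hx | ⟨p, hp, rfl, hj⟩)
      · split_ifs at hx with hc
        · exact Or.inr ⟨h, by simp, hc.1.symm, hc.2⟩
        · exact Or.inl hx
      · exact Or.inr ⟨p, by simp [hp], rfl, by simpa using hj⟩
    · rintro (hx | ⟨p, hp, rfl, hj⟩)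
      · left; split_ifs with hc
        · rfl
        · exact hx
      · rcases List.mem_cons.mp hp with rfl | hpt
        · left; simp [hj]
        · exact Or.inr ⟨p, hpt, rfl, by simpa using hj⟩

theorem markAll_mono (hs : List (Int × (Int × Int))) (v : List Bool) (j : Nat)
    (h : v.getD j false = true) : (markAll hs v).getD j false = true :=
  (markAll_getD_true hs v j).mpr (Or.inl h)

theorem markAll_getD_false (hs : List (Int × (Int × Int))) (v : List Bool) (j : Nat)
    (h : (markAll hs v).getD j false = false) : v.getD j false = false := by
  cases hx : v.getD j false with
  | false => rfl
  | true => rw [markAll_mono hs v j hx] at h; simp at h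

theorem markAll_count (hs : List (Int × (Int × Int))) (v : List Bool)
    (hpw : hs.Pairwise (fun p q => p.1 < q.1))
    (hok : ∀ p ∈ hs, 0 ≤ p.1 ∧ p.1.toNat < v.length ∧ v.getD p.1.toNat false = false) :
    (markAll hs v).count false + hs.length = v.count false := by
  induction hs generalizing v with
  | nil => simp [markAll]
  | cons h t ih =>
    obtain ⟨hh0, hhlen, hhfalse⟩ := hok h (by simp)
    have hset := countFalse_set v h.1.toNat hhlen hhfalse
    have hstep : markAll (h :: t) v = markAll t (v.set h.1.toNat true) := rfl
    rw [hstep]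
    have hok' : ∀ p ∈ t, 0 ≤ p.1 ∧ p.1.toNat < (v.set h.1.toNat true).length ∧
        (v.set h.1.toNat true).getD p.1.toNat false = false := by
      intro p hp
      obtain ⟨h0, hlen, hfalse⟩ := hok p (by simp [hp])
      refine ⟨h0, by simpa using hlen, ?_⟩
      have hne : p.1.toNat ≠ h.1.toNat := by
        have := (List.pairwise_cons.mp hpw).1 p hp
        omega
      rw [getD_set_bool]
      simpa [hne] using hfalse
    have := ih (v.set h.1.toNat true) (List.pairwise_cons.mp hpw).2 hok'
    simp only [List.length_cons]
    omega

-- splicing a whole batch of markings into a Reach derivation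
theorem markAll_splice (finish : Int × Int) (stores : List (Int × Int)) :
    ∀ (hs : List (Int × (Int × Int))) (v : List Bool) (q : Int × Int),
      hs.Pairwise (fun p q => p.1 < q.1) →
      (∀ p ∈ hs, 0 ≤ p.1 ∧ p.1.toNat < v.length ∧ v.getD p.1.toNat false = false ∧
        p.2 = stores.getD p.1.toNat (0, 0)) →
      Reach finish stores v q →
      Reach finish stores (markAll hs v) q ∨
        ∃ p ∈ hs, Reach finish stores (markAll hs v) p.2 := by
  intro hs
  induction hs with
  | nil => intro v q _ _ h; exact Or.inl h
  | cons h t ih =>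
    intro v q hpw hok hr
    obtain ⟨hh0, hhlen, hhfalse, hhstore⟩ := hok h (by simp)
    have hok' : ∀ p ∈ t, 0 ≤ p.1 ∧ p.1.toNat < (v.set h.1.toNat true).length ∧
        (v.set h.1.toNat true).getD p.1.toNat false = false ∧
        p.2 = stores.getD p.1.toNat (0, 0) := by
      intro p hp
      obtain ⟨h0, hlen, hfalse, hstore⟩ := hok p (by simp [hp])
      have hne : p.1.toNat ≠ h.1.toNat := by
        have := (List.pairwise_cons.mp hpw).1 p hp
        omega
      refine ⟨h0, by simpa using hlen, ?_, hstore⟩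
      rw [getD_set_bool]
      simpa [hne] using hfalse
    have hstep : markAll (h :: t) v = markAll t (v.set h.1.toNat true) := rfl
    rcases reach_splice hr h.1.toNat hhlen hhfalse with h1 | h2
    · rcases ih (v.set h.1.toNat true) q (List.pairwise_cons.mp hpw).2 hok' h1 with ha | ⟨p, hp, hb⟩
      · exact Or.inl (hstep ▸ ha)
      · exact Or.inr ⟨p, by simp [hp], hstep ▸ hb⟩
    · rw [← hhstore] at h2
      rcases ih (v.set h.1.toNat true) h.2 (List.pairwise_cons.mp hpw).2 hok' h2 with ha | ⟨p, hp, hb⟩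
      · exact Or.inr ⟨h, by simp, hstep ▸ ha⟩
      · exact Or.inr ⟨p, by simp [hp], hstep ▸ hb⟩

-- one step of B's loop preserves the frontier invariant
theorem stepB_iff (finish : Int × Int) (stores : List (Int × Int)) (cur : Int × Int)
    (v : List Bool) (fr' : List (Int × Int)) (hclose : ¬ get_dist cur finish ≤ mdist)
    (hg : Good stores v) :
    ((∃ p ∈ fr' ++ (hitsB cur v stores).map (·.2),
        Reach finish stores (markAll (hitsB cur v stores) v) p) ↔
      (∃ p ∈ fr' ++ [cur], Reach finish stores v p)) := by
  set hs := hitsB cur v stores with hhs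
  have hok : ∀ p ∈ hs, 0 ≤ p.1 ∧ p.1.toNat < v.length ∧ v.getD p.1.toNat false = false ∧
      p.2 = stores.getD p.1.toNat (0, 0) ∧ get_dist cur p.2 ≤ mdist := by
    intro p hp
    obtain ⟨k, hkv, hks, hp1, hvk, hp2, hdist⟩ := mem_hitsB.mp (hhs ▸ hp)
    refine ⟨by omega, by simp [hp1]; omega, by simpa [hp1] using hvk, by simpa [hp1] using hp2, ?_⟩
    rw [hp2]; exact hdist
  have hok' : ∀ p ∈ hs, 0 ≤ p.1 ∧ p.1.toNat < v.length ∧ v.getD p.1.toNat false = false ∧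
      p.2 = stores.getD p.1.toNat (0, 0) := fun p hp => ⟨(hok p hp).1, (hok p hp).2.1,
        (hok p hp).2.2.1, (hok p hp).2.2.2.1⟩
  have hpw := hitsB_pairwise cur v stores
  constructor
  · rintro ⟨p, hp, hrp⟩
    rcases List.mem_append.mp hp with hpf | hph
    · -- old frontier element: un-mark via monotonicity
      refine ⟨p, List.mem_append_left _ hpf, ?_⟩
      exact reach_mono hrp v (by rw [markAll_length]) (fun j hj => markAll_mono hs v j hj)
    · -- freshly pushed store: it is one step from cur
      obtain ⟨q, hq, rfl⟩ := List.mem_map.mp hph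
      obtain ⟨h0, hlen, hfalse, hstore, hdist⟩ := hok q hq
      refine ⟨cur, List.mem_append_right _ (by simp), ?_⟩
      refine Reach.step q.1.toNat hlen hfalse (hstore ▸ hdist) ?_
      rw [← hstore]
      refine reach_mono hrp (v.set q.1.toNat true) (by simp [markAll_length]) ?_
      intro j hj
      rw [getD_set_bool] at hj
      split_ifs at hj with hc
      · exact (markAll_getD_true hs v j).mpr (Or.inr ⟨q, hq, by omega, hc.2⟩)
      · exact markAll_mono hs v j hj
  · rintro ⟨p, hp, hrp⟩
    rcases List.mem_append.mp hp with hpf | hpc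
    · rcases markAll_splice finish stores hs v p hpw hok' hrp with ha | ⟨q, hq, hb⟩
      · exact ⟨p, List.mem_append_left _ hpf, ha⟩
      · exact ⟨q.2, List.mem_append_right _ (List.mem_map_of_mem hq), hb⟩
    · -- p = cur: invert the Reach step, its first store is a hit
      have hpcur : p = cur := by simpa using hpc
      subst hpcur
      cases hrp with
      | done hd => exact absurd hd hclose
      | step i hi hf hc hr =>
        have his : i < stores.length := hg i hi hf
        have hmem : ((i : Int), stores.getD i (0, 0)) ∈ hs := by
          rw [hhs, mem_hitsB]
          exact ⟨i, hi, his, rfl, hf, rfl, hc⟩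
        have hrv : Reach finish stores v (stores.getD i (0, 0)) :=
          reach_mono hr v (by simp) (fun j hj => set_true_mono v i j hj)
        rcases markAll_splice finish stores hs v _ hpw hok' hrv with ha | ⟨q, hq, hb⟩
        · exact ⟨stores.getD i (0, 0),
            List.mem_append_right _ (by exact List.mem_map_of_mem (f := (·.2)) hmem), ha⟩
        · exact ⟨q.2, List.mem_append_right _ (List.mem_map_of_mem hq), hb⟩

-- correctness of B's while-loop under the fuel bound
theorem loopB_main (finish : Int × Int) (stores : List (Int × Int)) :
    ∀ fuel (v : List Bool) (fr : List (Int × Int)), Good stores v →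
      v.count false + fr.length < fuel →
      (dfsLoopB finish stores fuel v fr = true ↔ ∃ p ∈ fr, Reach finish stores v p) := by
  intro fuel
  induction fuel with
  | zero => intro v fr hg hb; omega
  | succ fuel ih =>
    intro v fr hg hb
    rcases hlast : fr.getLast? with _ | cur
    · have hfre : fr = [] := List.getLast?_eq_none_iff.mp hlast
      rw [dfsLoopB, hlast]
      simp [hfre]
    · obtain ⟨fr', rfl⟩ := List.getLast?_eq_some_iff.mp hlast
      by_cases hd : get_dist cur finish ≤ mdist
      · rw [dfsLoopB, hlast]
        dsimp only
        rw [if_pos hd]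
        simp only [true_iff]
        exact ⟨cur, by simp, Reach.done hd⟩
      · set hs := hitsB cur v stores with hhs
        have hok : ∀ p ∈ hs, 0 ≤ p.1 ∧ p.1.toNat < v.length ∧ v.getD p.1.toNat false = false := by
          intro p hp
          obtain ⟨k, hkv, hks, hp1, hvk, hp2, hdist⟩ := mem_hitsB.mp (hhs ▸ hp)
          exact ⟨by omega, by simp [hp1]; omega, by simpa [hp1] using hvk⟩
        have hcnt := markAll_count hs v (hitsB_pairwise cur v stores) hok
        have hg1 : Good stores (markAll hs v) := by
          intro l hl hlf
          exact hg l (by rw [markAll_length] at hl; omega) (markAll_getD_false hs v l hlf)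
        have hstep : dfsLoopB finish stores (fuel + 1) v (fr' ++ [cur]) =
            dfsLoopB finish stores fuel (markAll hs v) (fr' ++ hs.map (·.2)) := by
          rw [dfsLoopB, hlast]
          dsimp only
          rw [if_neg hd, List.dropLast_concat]
          rfl
        rw [hstep,
          ih (markAll hs v) (fr' ++ hs.map (·.2)) hg1 (by
            simp only [List.length_append, List.length_map, List.length_cons,
              List.length_nil] at hb ⊢
            omega)]
        exact stepB_iff finish stores cur v fr' hd hg

-- ===== VERDICT (by name: the statement is the Claim_ definition above) =====
theorem dfs_spec : Claim_equal_dfs := by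
  unfold Claim_equal_dfs Spec_dfs
  intro start finish visited stores _ hpre
  by_cases hd : get_dist start finish ≤ mdist
  · have hA : dfsAuxA finish stores (visited.length + 1) start visited = some (true, visited) := by
      rw [dfsAuxA, if_pos hd]
    have hB : dfsLoopB finish stores (visited.length + 2) visited [start] = true := by
      show dfsLoopB finish stores ((visited.length + 1) + 1) visited [start] = true
      rw [dfsLoopB]
      have hl : ([start] : List (Int × Int)).getLast? = some start := rfl
      rw [hl]
      dsimp only
      rw [if_pos hd]
    simp [dfs, dfs_alt, hA, hB]
  · have hg : Good stores visited := by
      rcases hpre with hg | hclose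
      · exact hg
      · exfalso
        apply hd
        show |start.1 - finish.1| + |start.2 - finish.2| ≤ (50 * 20 : Int)
        norm_num
        exact hclose
    have hcl : visited.count false ≤ visited.length := List.count_le_length
    obtain ⟨r, v', heqA, _, _, _, htrue, hfalse⟩ :=
      auxA_main finish stores (visited.length + 1) start visited hg (by omega)
    have hBiff := loopB_main finish stores (visited.length + 2) visited [start] hg (by simp; omega)
    have hAiff : r = true ↔ Reach finish stores visited start := by
      constructor
      · exact htrue
      · intro hre
        cases hrc : r with
        | true => rfl
        | false =>
          obtain ⟨hii, hnr⟩ := hfalse hrc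
          exact absurd (hii start hre) hnr
    have hBiff' : dfs_alt start finish visited stores = true ↔ Reach finish stores visited start := by
      rw [dfs_alt, hBiff]
      simp
    have hdfs : dfs start finish visited stores = r := by
      simp [dfs, heqA]
    rw [hdfs]
    cases r with
    | true => exact (hBiff'.mpr (hAiff.mp rfl)).symm
    | false =>
      cases hb : dfs_alt start finish visited stores with
      | false => rfl
      | true => exact absurd (hAiff.mpr (hBiff'.mp hb)) (by simp)
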